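-- pv_equiv track=rewrite | github.com/wzl20040621wzl-web/LaVic | LaViCDocs-main/AIAgentData/skill/simulation-model-generation-orchestrator/scripts/fetch_images.py | extract_srcset_urls
-- ===== SOURCE A (Python) =====
-- def extract_srcset_urls(srcset_value):
--     urls = []
--     if not srcset_value:
--         return urls
--     parts = [p.strip() for p in srcset_value.split(",") if p.strip()]
--     for part in parts:
--         url_part = part.split()[0]
--         if url_part:
--             urls.append(url_part)
--     return urls
-- ===== SOURCE B (Python) =====
-- def extract_srcset_urls(srcset_value):
--     # One-pass character scan: no intermediate split/strip lists.
--     urls = []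
--     token = ""
--     seen = False  # first token of the current segment already complete
--     for ch in srcset_value + ",":
--         if ch == ",":
--             if token:
--                 urls.append(token)
--             token = ""
--             seen = False
--         elif ch.isspace():
--             if token:
--                 seen = True
--         else:
--             if not seen:
--                 token += ch
--     return urls
-- ===== Notes on version B (the rewrite author's own statement) =====
-- stated objective: alternative
-- what changed: Replaces A's split-on-comma / strip / whitespace-split pipeline with a single one-pass character scan that builds each segment's first token in a (token, seen) state machine, materializing no intermediate lists.
import Mathlib
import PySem

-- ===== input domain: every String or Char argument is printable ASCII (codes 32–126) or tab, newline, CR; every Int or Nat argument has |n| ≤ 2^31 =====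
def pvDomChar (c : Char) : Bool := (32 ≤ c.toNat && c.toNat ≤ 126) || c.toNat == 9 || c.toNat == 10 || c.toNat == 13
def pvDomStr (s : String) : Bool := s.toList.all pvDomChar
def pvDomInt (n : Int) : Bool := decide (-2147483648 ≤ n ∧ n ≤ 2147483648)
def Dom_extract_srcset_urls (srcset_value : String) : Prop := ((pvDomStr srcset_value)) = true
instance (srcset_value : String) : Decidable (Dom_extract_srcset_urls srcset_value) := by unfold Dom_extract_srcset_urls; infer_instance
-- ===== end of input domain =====

-- B replaces A's split/strip/split pipeline by a single one-pass character scan (objective: alternative).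

-- ===== PORT A =====
def extract_srcset_urls (srcset_value : String) : List String :=
  let urls : List String := []
  if srcset_value = "" then urls
  else
    -- parts = [p.strip() for p in srcset_value.split(",") if p.strip()]
    let parts := ((PySem.Chars.splitOn srcset_value.toList [',']).filter
        (fun p => !(PySem.Chars.strip p).isEmpty)).map PySem.Chars.strip
    parts.foldl (fun urls part =>
      -- part.split()[0]: every part is a nonempty stripped string, so the IndexError branch of [0] is unreachable
      let url_part := (PySem.List.pyGet? (PySem.Chars.split₀ part) 0).getD []
      if !url_part.isEmpty then urls ++ [String.mk url_part] else urls) urls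

-- ===== PORT B =====
-- loop body of Source B's single for-loop; state = (urls, token, seen)
def altStep (st : List String × List Char × Bool) (ch : Char) : List String × List Char × Bool :=
  let urls := st.1
  let token := st.2.1
  let seen := st.2.2
  if ch = ',' then
    ((if token.isEmpty then urls else urls ++ [String.mk token]), [], false)
  else if PySem.Chars.isspace ch then
    (urls, token, if token.isEmpty then seen else true)
  else
    (urls, (if seen then token else token ++ [ch]), seen)

def extract_srcset_urls_alt (srcset_value : String) : List String :=
  ((srcset_value.toList ++ [',']).foldl altStep ([], [], false)).1

-- ===== PRECONDITION & SPEC =====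
def Spec_extract_srcset_urls (srcset_value : String) (out : List String) : Prop := out = extract_srcset_urls_alt srcset_value
instance (srcset_value : String) (out : List String) : Decidable (Spec_extract_srcset_urls srcset_value out) := by unfold Spec_extract_srcset_urls; infer_instance

-- ===== CLAIM (what is proved, stated in full; the proofs are below) =====
def Claim_equal_extract_srcset_urls : Prop := ∀ (srcset_value : String), Dom_extract_srcset_urls srcset_value → Spec_extract_srcset_urls srcset_value (extract_srcset_urls srcset_value)

-- ===== LEMMAS AND PROOFS =====

-- non-space test, the separator of str.split()
def nsp (c : Char) : Bool := !(PySem.Chars.isspace c)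

-- first whitespace-separated token of a list of chars ([] if none)
def firstTok : List Char → List Char
  | [] => []
  | c :: r => if PySem.Chars.isspace c then firstTok r else c :: r.takeWhile nsp

-- the contribution of one comma-segment to the result
def tokSpec (seg : List Char) : List String :=
  if (firstTok seg).isEmpty then [] else [String.mk (firstTok seg)]

-- whitespace-separated words (spec of PySem.Chars.split₀)
def wtok : List Char → List (List Char)
  | [] => []
  | c :: r =>
    if PySem.Chars.isspace c then wtok r
    else (c :: r.takeWhile nsp) :: wtok (r.dropWhile nsp)
termination_by l => l.length
decreasing_by
  · simp
  · simp
    exact List.length_dropWhile_le _ _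

-- comma-split (spec of PySem.Chars.splitOn · [','])
def segsF : List Char → List (List Char)
  | [] => [[]]
  | c :: r => if c = ',' then [] :: segsF r else (segsF r).modifyHead (c :: ·)

-- what B's loop appends while scanning the remaining chars from state (token, seen)
def outSpec : List Char → List Char → Bool → List String
  | [], token, _ => if token.isEmpty then [] else [String.mk token]
  | c :: r, token, seen =>
    if c = ',' then (if token.isEmpty then [] else [String.mk token]) ++ outSpec r [] false
    else if PySem.Chars.isspace c then outSpec r token (if token.isEmpty then seen else true)
    else outSpec r (if seen then token else token ++ [c]) seen

-- outSpec restricted to a single (comma-free) segment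
def fTok : List Char → List Char → Bool → List String
  | [], token, _ => if token.isEmpty then [] else [String.mk token]
  | c :: r, token, seen =>
    if PySem.Chars.isspace c then fTok r token (if token.isEmpty then seen else true)
    else fTok r (if seen then token else token ++ [c]) seen

theorem segsF_ne_nil (cs : List Char) : segsF cs ≠ [] := by
  induction cs with
  | nil => simp [segsF]
  | cons c r ih =>
    simp only [segsF]
    split
    · simp
    · cases h : segsF r with
      | nil => exact absurd h ih
      | cons a t => simp [List.modifyHead]

theorem splitOn_go_spec (cs : List Char) : ∀ (fuel : Nat) (cur : List Char) (acc : List (List Char)),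
    cs.length < fuel →
    PySem.Chars.splitOn.go [','] fuel cs cur acc = acc.reverse ++ (segsF cs).modifyHead (cur.reverse ++ ·) := by
  induction cs with
  | nil =>
    intro fuel cur acc h
    cases fuel with
    | zero => omega
    | succ f => simp [PySem.Chars.splitOn.go, segsF]
  | cons c r ih =>
    intro fuel cur acc h
    cases fuel with
    | zero => simp at h
    | succ f =>
      by_cases hc : c = ','
      · subst hc
        have hpre : List.isPrefixOf [','] (',' :: r) = true := by simp [List.isPrefixOf]
        rw [PySem.Chars.splitOn.go]
        simp only [hpre, if_pos]
        rw [show List.drop [','].length (',' :: r) = r from rfl]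
        rw [ih f [] (cur.reverse :: acc) (by simpa using h)]
        cases hseg : segsF r with
        | nil => exact absurd hseg (segsF_ne_nil r)
        | cons a t => simp [segsF, hseg, List.modifyHead]
      · have hpre : List.isPrefixOf [','] (c :: r) = false := by
          simp [List.isPrefixOf]
          exact fun h' => hc h'.symm
        rw [PySem.Chars.splitOn.go]
        simp only [hpre]
        rw [ih f (c :: cur) acc (by simp at h ⊢; omega)]
        simp only [segsF, if_neg hc]
        cases hseg : segsF r with
        | nil => exact absurd hseg (segsF_ne_nil r)
        | cons a t => simp [List.modifyHead]

theorem splitOn_eq_segsF (cs : List Char) : PySem.Chars.splitOn cs [','] = segsF cs := by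
  rw [PySem.Chars.splitOn, splitOn_go_spec cs (cs.length + 1) [] [] (by omega)]
  cases hseg : segsF cs with
  | nil => exact absurd hseg (segsF_ne_nil cs)
  | cons a t => simp [List.modifyHead]

theorem split₀_go_spec (seg : List Char) : ∀ (cur : List Char) (acc : List (List Char)),
    PySem.Chars.split₀.go seg cur acc =
      acc.reverse ++ (if cur.isEmpty then wtok seg
        else (cur.reverse ++ seg.takeWhile nsp) :: wtok (seg.dropWhile nsp)) := by
  induction seg with
  | nil =>
    intro cur acc
    cases cur with
    | nil => simp [PySem.Chars.split₀.go, wtok]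
    | cons a t => simp [PySem.Chars.split₀.go, wtok]
  | cons c r ih =>
    intro cur acc
    by_cases hc : PySem.Chars.isspace c = true
    · cases cur with
      | nil =>
        rw [PySem.Chars.split₀.go]
        simp only [hc, if_pos, List.isEmpty_nil]
        rw [ih [] acc]
        simp [wtok, hc]
      | cons a t =>
        rw [PySem.Chars.split₀.go]
        simp only [hc, if_pos, List.isEmpty_cons]
        rw [ih [] ((a :: t).reverse :: acc)]
        have hn : nsp c = false := by simp [nsp, hc]
        simp [wtok, hc, hn, List.takeWhile_cons, List.dropWhile_cons]
    · have hc' : PySem.Chars.isspace c = false := by simpa using hc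
      have hn : nsp c = true := by simp [nsp, hc']
      rw [PySem.Chars.split₀.go]
      simp only [hc', Bool.false_eq_true, if_false]
      rw [ih (c :: cur) acc]
      cases cur with
      | nil => simp [wtok, hc', hn, List.takeWhile_cons, List.dropWhile_cons]
      | cons a t => simp [wtok, hc', hn, List.takeWhile_cons, List.dropWhile_cons]

theorem split₀_eq_wtok (seg : List Char) : PySem.Chars.split₀ seg = wtok seg := by
  rw [PySem.Chars.split₀, split₀_go_spec seg [] []]
  simp

theorem headD_wtok (seg : List Char) : (wtok seg).head?.getD [] = firstTok seg := by
  induction seg with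
  | nil => simp [wtok, firstTok]
  | cons c r ih =>
    by_cases hc : PySem.Chars.isspace c = true
    · rw [wtok, firstTok]; simp [hc, ih]
    · rw [wtok, firstTok]; simp [hc]

theorem pyfirst (seg : List Char) :
    (PySem.List.pyGet? (PySem.Chars.split₀ seg) 0).getD [] = firstTok seg := by
  rw [split₀_eq_wtok, ← headD_wtok]
  cases wtok seg with
  | nil => simp [PySem.List.pyGet?]
  | cons a t => simp [PySem.List.pyGet?, PySem.List.pyIdx?]

theorem firstTok_nil_iff (seg : List Char) :
    firstTok seg = [] ↔ ∀ c ∈ seg, PySem.Chars.isspace c = true := by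
  induction seg with
  | nil => simp [firstTok]
  | cons c r ih =>
    by_cases hc : PySem.Chars.isspace c = true
    · rw [firstTok]; simp [hc, ih]
    · rw [firstTok]
      simp only [hc, Bool.false_eq_true, if_false]
      constructor
      · intro h
        exact absurd h (List.cons_ne_nil _ _)
      · intro h
        exact absurd (h c List.mem_cons_self) hc

theorem wtok_space (sp : List Char) (hsp : ∀ c ∈ sp, PySem.Chars.isspace c = true) : wtok sp = [] := by
  induction sp with
  | nil => simp [wtok]
  | cons c r ih =>
    have hc := hsp c List.mem_cons_self
    rw [wtok]
    simp only [hc, if_pos]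
    exact ih (fun d hd => hsp d (List.mem_cons_of_mem _ hd))

theorem takeWhile_nsp_append (sp : List Char) (hsp : ∀ c ∈ sp, PySem.Chars.isspace c = true)
    (t : List Char) : (t ++ sp).takeWhile nsp = t.takeWhile nsp := by
  induction t with
  | nil =>
    cases sp with
    | nil => simp
    | cons c r =>
      have hc := hsp c List.mem_cons_self
      simp [List.takeWhile_cons, nsp, hc]
  | cons c t ih =>
    simp only [List.cons_append, List.takeWhile_cons]
    cases hn : nsp c <;> simp [ih]

theorem dropWhile_nsp_append (sp : List Char) (hsp : ∀ c ∈ sp, PySem.Chars.isspace c = true)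
    (t : List Char) : (t ++ sp).dropWhile nsp = t.dropWhile nsp ++ sp := by
  induction t with
  | nil =>
    cases sp with
    | nil => simp
    | cons c r =>
      have hc := hsp c List.mem_cons_self
      simp [List.dropWhile_cons, nsp, hc]
  | cons c t ih =>
    simp only [List.cons_append, List.dropWhile_cons]
    cases hn : nsp c <;> simp [hn, ih]

theorem wtok_append_space (sp : List Char) (hsp : ∀ c ∈ sp, PySem.Chars.isspace c = true) :
    ∀ (n : Nat) (t : List Char), t.length ≤ n → wtok (t ++ sp) = wtok t := by
  intro n
  induction n with
  | zero =>
    intro t ht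
    have : t = [] := by cases t <;> simp_all
    subst this
    simpa [wtok] using wtok_space sp hsp
  | succ m ih =>
    intro t ht
    cases t with
    | nil => simpa [wtok] using wtok_space sp hsp
    | cons c r =>
      by_cases hc : PySem.Chars.isspace c = true
      · rw [List.cons_append, wtok, wtok]
        simp only [hc, if_pos]
        exact ih r (by simp at ht; omega)
      · have hc' : PySem.Chars.isspace c = false := by simpa using hc
        rw [List.cons_append, wtok, wtok]
        simp only [hc', Bool.false_eq_true, if_false]
        rw [takeWhile_nsp_append sp hsp, dropWhile_nsp_append sp hsp]
        rw [ih (r.dropWhile nsp) (le_trans (List.length_dropWhile_le _ _) (by simp at ht; omega))]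

theorem wtok_lstrip (x : List Char) : wtok (PySem.Chars.lstrip x) = wtok x := by
  rw [PySem.Chars.lstrip]
  induction x with
  | nil => simp
  | cons c r ih =>
    by_cases hc : PySem.Chars.isspace c = true
    · rw [List.dropWhile_cons]
      simp only [hc, if_pos]
      rw [ih, wtok]
      simp [hc]
    · have hc' : PySem.Chars.isspace c = false := by simpa using hc
      rw [List.dropWhile_cons]
      simp [hc']

theorem wtok_rstrip (x : List Char) : wtok (PySem.Chars.rstrip x) = wtok x := by
  rw [PySem.Chars.rstrip]
  have hdecomp : x = (x.reverse.dropWhile PySem.Chars.isspace).reverse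
      ++ (x.reverse.takeWhile PySem.Chars.isspace).reverse := by
    conv_lhs => rw [← List.reverse_reverse x]
    rw [← List.reverse_append, List.takeWhile_append_dropWhile]
  have hsp : ∀ c ∈ (x.reverse.takeWhile PySem.Chars.isspace).reverse, PySem.Chars.isspace c = true := by
    intro c hc
    rw [List.mem_reverse] at hc
    exact List.mem_takeWhile_imp hc
  conv_rhs => rw [hdecomp]
  exact (wtok_append_space _ hsp _ _ (le_refl _)).symm

theorem wtok_strip (seg : List Char) : wtok (PySem.Chars.strip seg) = wtok seg := by
  rw [PySem.Chars.strip, wtok_rstrip, wtok_lstrip]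

theorem firstTok_strip (seg : List Char) : firstTok (PySem.Chars.strip seg) = firstTok seg := by
  rw [← headD_wtok, ← headD_wtok, wtok_strip]

theorem strip_nil_of_space (seg : List Char) (h : ∀ c ∈ seg, PySem.Chars.isspace c = true) :
    PySem.Chars.strip seg = [] := by
  rw [PySem.Chars.strip, PySem.Chars.lstrip]
  have : List.dropWhile PySem.Chars.isspace seg = [] := List.dropWhile_eq_nil_iff.mpr h
  rw [this]
  rfl

-- per-segment agreement of A's pipeline with tokSpec
theorem seg_contrib (seg : List Char) :
    (if !(PySem.Chars.strip seg).isEmpty then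
      (if !(firstTok (PySem.Chars.strip seg)).isEmpty then [String.mk (firstTok (PySem.Chars.strip seg))] else [])
      else []) = tokSpec seg := by
  rw [firstTok_strip]
  by_cases hs : PySem.Chars.strip seg = []
  · have hft : firstTok seg = [] := by
      rw [← firstTok_strip, hs]; rfl
    simp [hs, tokSpec, hft]
  · have hft : firstTok seg ≠ [] := by
      intro h
      exact hs (strip_nil_of_space seg ((firstTok_nil_iff seg).mp h))
    simp [tokSpec, List.isEmpty_iff, hs, hft]

theorem A_fold (parts : List (List Char)) (urls : List String) :
    parts.foldl (fun urls part =>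
      if !((PySem.List.pyGet? (PySem.Chars.split₀ part) 0).getD []).isEmpty then
        urls ++ [String.mk ((PySem.List.pyGet? (PySem.Chars.split₀ part) 0).getD [])] else urls) urls
    = urls ++ parts.flatMap (fun part =>
        if !(firstTok part).isEmpty then [String.mk (firstTok part)] else []) := by
  induction parts generalizing urls with
  | nil => simp
  | cons p t ih =>
    rw [List.foldl_cons, ih, List.flatMap_cons, pyfirst]
    by_cases hp : (firstTok p).isEmpty <;> simp [hp]

theorem flatMap_filter (q : List Char → Bool) (h : List Char → List String) (l : List (List Char)) :
    (l.filter q).flatMap h = l.flatMap (fun x => if q x then h x else []) := by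
  induction l with
  | nil => simp
  | cons a t ih =>
    by_cases hq : q a <;> simp [List.filter_cons, hq, ih]

theorem A_eq (s : String) : extract_srcset_urls s = (segsF s.toList).flatMap tokSpec := by
  by_cases hs : s = ""
  · subst hs
    have h0 : ("" : String).toList = [] := rfl
    simp only [extract_srcset_urls, if_pos rfl, h0, segsF]
    simp [tokSpec, firstTok]
  · simp only [extract_srcset_urls, if_neg hs]
    rw [splitOn_eq_segsF, A_fold, List.nil_append, List.flatMap_map, flatMap_filter]
    congr 1
    funext x
    simpa using seg_contrib x

theorem fold_out (cs : List Char) : ∀ (urls : List String) (token : List Char) (seen : Bool),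
    (cs ++ [',']).foldl altStep (urls, token, seen) = (urls ++ outSpec cs token seen, [], false) := by
  induction cs with
  | nil =>
    intro urls token seen
    simp only [List.nil_append, List.foldl_cons, List.foldl_nil, altStep, outSpec]
    by_cases ht : token.isEmpty <;> simp [ht]
  | cons c r ih =>
    intro urls token seen
    simp only [List.cons_append, List.foldl_cons]
    by_cases hc : c = ','
    · subst hc
      rw [show altStep (urls, token, seen) ',' =
          ((if token.isEmpty then urls else urls ++ [String.mk token]), [], false) from by simp [altStep]]
      rw [ih]
      rw [outSpec]
      simp only [if_pos rfl]
      by_cases ht : token.isEmpty <;> simp [ht]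
    · by_cases hsp : PySem.Chars.isspace c = true
      · rw [show altStep (urls, token, seen) c =
            (urls, token, if token.isEmpty then seen else true) from by simp [altStep, hc, hsp]]
        rw [ih, outSpec]
        simp [hc, hsp]
      · have hsp' : PySem.Chars.isspace c = false := by simpa using hsp
        rw [show altStep (urls, token, seen) c =
            (urls, (if seen then token else token ++ [c]), seen) from by simp [altStep, hc, hsp']]
        rw [ih, outSpec]
        simp [hc, hsp']

theorem B_eq (s : String) : extract_srcset_urls_alt s = outSpec s.toList [] false := by
  rw [extract_srcset_urls_alt, fold_out]
  simp

theorem fTok_true (seg : List Char) : ∀ (token : List Char), token ≠ [] →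
    fTok seg token true = [String.mk token] := by
  induction seg with
  | nil =>
    intro token ht
    rw [fTok]
    simp [List.isEmpty_iff, ht]
  | cons c r ih =>
    intro token ht
    rw [fTok]
    by_cases hc : PySem.Chars.isspace c = true
    · simp only [hc, if_pos]
      rw [show (if token.isEmpty then true else true) = true from by simp]
      exact ih token ht
    · have hc' : PySem.Chars.isspace c = false := by simpa using hc
      simp only [hc', Bool.false_eq_true, if_false, if_pos]
      exact ih token ht

theorem fTok_false (seg : List Char) : ∀ (token : List Char),
    fTok seg token false =
      if token.isEmpty then tokSpec seg else [String.mk (token ++ seg.takeWhile nsp)] := by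
  induction seg with
  | nil =>
    intro token
    rw [fTok]
    by_cases ht : token.isEmpty <;> simp [ht, tokSpec, firstTok]
  | cons c r ih =>
    intro token
    rw [fTok]
    by_cases hc : PySem.Chars.isspace c = true
    · simp only [hc, if_pos]
      by_cases ht : token.isEmpty
      · rw [show (if token.isEmpty then false else true) = false from by simp [ht]]
        rw [ih token]
        simp only [ht, if_pos]
        have : tokSpec (c :: r) = tokSpec r := by
          rw [tokSpec, tokSpec, firstTok]
          simp [hc]
        simp [this]
      · have ht' : token ≠ [] := by simpa [List.isEmpty_iff] using ht
        rw [show (if token.isEmpty then false else true) = true from by simp [ht]]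
        rw [fTok_true r token ht']
        have hn : nsp c = false := by simp [nsp, hc]
        simp [ht, List.takeWhile_cons, hn]
    · have hc' : PySem.Chars.isspace c = false := by simpa using hc
      have hn : nsp c = true := by simp [nsp, hc']
      simp only [hc', Bool.false_eq_true, if_false]
      rw [ih (token ++ [c])]
      have hne : (token ++ [c]).isEmpty = false := by simp
      simp only [hne, Bool.false_eq_true, if_false]
      by_cases ht : token.isEmpty
      · have : token = [] := by simpa [List.isEmpty_iff] using ht
        subst this
        simp [tokSpec, firstTok, hc', List.takeWhile_cons, hn]
      · simp [ht, List.takeWhile_cons, hn, List.append_assoc]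

theorem out_eq (cs : List Char) : ∀ (token : List Char) (seen : Bool),
    outSpec cs token seen =
      fTok ((segsF cs).headD []) token seen ++ ((segsF cs).tail).flatMap tokSpec := by
  induction cs with
  | nil =>
    intro token seen
    simp [outSpec, segsF, fTok]
  | cons c r ih =>
    intro token seen
    by_cases hc : c = ','
    · subst hc
      rw [outSpec]
      simp only [if_pos rfl, segsF]
      rw [ih [] false]
      rw [fTok_false]
      simp only [List.isEmpty_nil, if_pos]
      cases hseg : segsF r with
      | nil => exact absurd hseg (segsF_ne_nil r)
      | cons a t =>
        simp [fTok, List.append_assoc]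
    · by_cases hsp : PySem.Chars.isspace c = true
      · rw [outSpec]
        simp only [hc, if_neg, if_false, hsp, if_pos]
        rw [ih token (if token.isEmpty then seen else true)]
        rw [segsF]
        simp only [hc, if_neg, if_false]
        cases hseg : segsF r with
        | nil => exact absurd hseg (segsF_ne_nil r)
        | cons a t =>
          simp only [List.modifyHead, List.headD_cons, List.tail_cons]
          rw [fTok]
          simp [hsp]
      · have hsp' : PySem.Chars.isspace c = false := by simpa using hsp
        rw [outSpec]
        simp only [hc, if_neg, if_false, hsp', Bool.false_eq_true]
        rw [ih (if seen then token else token ++ [c]) seen]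
        rw [segsF]
        simp only [hc, if_neg, if_false]
        cases hseg : segsF r with
        | nil => exact absurd hseg (segsF_ne_nil r)
        | cons a t =>
          simp only [List.modifyHead, List.headD_cons, List.tail_cons]
          rw [fTok]
          simp [hsp']

theorem out_flatMap (cs : List Char) : outSpec cs [] false = (segsF cs).flatMap tokSpec := by
  rw [out_eq cs [] false, fTok_false]
  simp only [List.isEmpty_nil, if_pos]
  cases hseg : segsF cs with
  | nil => exact absurd hseg (segsF_ne_nil cs)
  | cons a t => simp

-- ===== VERDICT (by name: the statement is the Claim_ definition above) =====
theorem extract_srcset_urls_spec : Claim_equal_extract_srcset_urls := by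
  intro s _
  show extract_srcset_urls s = extract_srcset_urls_alt s
  rw [A_eq, B_eq, out_flatMap]
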